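-- pv_equiv track=rewrite | github.com/AmroEwes/Course-Eligibility-and-Recommendation-System | Streamlit_App_8.py | find_additional_eligibilities
-- ===== SOURCE A (Python) =====
-- def is_eligible(course, taken_courses, prerequisites):
--     prereqs = prerequisites.get(course, [])
--     return all(prereq in taken_courses for prereq in prereqs)
--
-- def find_additional_eligibilities(courses, taken_courses, prerequisites):
--     additional_eligibilities = set()
--     for course in courses:
--         hypothetical_courses = taken_courses.copy()
--         hypothetical_courses.add(course)
--         for c in prerequisites.keys():
--             if is_eligible(c, hypothetical_courses, prerequisites) and c not in hypothetical_courses: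
--                 additional_eligibilities.add(c)
--     return list(additional_eligibilities)
-- ===== SOURCE B (Python) =====
-- def find_additional_eligibilities(courses, taken_courses, prerequisites):
--     # One classification pass: each prerequisite key is either already eligible
--     # ("needs nothing"), one course short ("needs exactly m"), or hopeless.
--     cands = []  # (c, need): need is None (no missing prereq) or the single missing prereq
--     for c, prereqs in prerequisites.items():
--         if c in taken_courses:
--             continue
--         missing = {p for p in prereqs if p not in taken_courses}
--         if len(missing) == 0:
--             cands.append((c, None))
--         elif len(missing) == 1:
--             (m,) = missing
--             cands.append((c, m))
--     result = set()
--     for course in courses: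
--         for c, need in cands:
--             if c != course and (need is None or need == course):
--                 result.add(c)
--     return list(result)
-- ===== Notes on version B (the rewrite author's own statement) =====
-- stated objective: faster
-- what changed: Replaces per-course hypothetical set copies and repeated full eligibility re-checks (all() over every prerequisite list for every course) by a single classification pass that reduces each key to 'needs nothing'/'needs exactly m'/'hopeless', after which each course needs only a constant-time test per candidate.
import Mathlib
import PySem

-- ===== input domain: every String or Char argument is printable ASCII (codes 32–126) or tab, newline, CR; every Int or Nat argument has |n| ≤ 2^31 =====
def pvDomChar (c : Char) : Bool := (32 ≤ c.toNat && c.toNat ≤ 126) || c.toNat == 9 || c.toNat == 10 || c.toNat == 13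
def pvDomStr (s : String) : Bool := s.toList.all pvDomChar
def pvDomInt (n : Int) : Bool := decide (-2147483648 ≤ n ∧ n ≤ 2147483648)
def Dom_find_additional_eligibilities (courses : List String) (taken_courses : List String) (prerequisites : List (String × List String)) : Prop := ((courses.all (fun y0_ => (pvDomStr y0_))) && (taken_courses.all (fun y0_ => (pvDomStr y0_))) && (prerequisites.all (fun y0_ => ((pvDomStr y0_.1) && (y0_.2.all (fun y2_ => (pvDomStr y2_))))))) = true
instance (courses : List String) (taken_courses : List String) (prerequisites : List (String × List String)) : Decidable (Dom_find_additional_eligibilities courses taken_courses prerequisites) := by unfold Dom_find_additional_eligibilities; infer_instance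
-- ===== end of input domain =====

-- B replaces A's per-course hypothetical set copies and repeated eligibility re-checks by a
-- single classification pass over the prerequisite keys (none/one/many missing prerequisites),
-- then a constant-time test per candidate per course.


-- ===== PORT A =====
def pvIsEligible (course : String) (taken_courses : PySem.Set String) (prerequisites : PySem.Dict String (List String)) : Bool :=
  (prerequisites.getD course []).all (fun p => PySem.Set.contains taken_courses p)

def find_additional_eligibilities (courses : List String) (taken_courses : List String) (prerequisites : List (String × List String)) : List String :=
  let d := PySem.Dict.ofList prerequisites
  courses.foldl (fun acc course =>
    let hyp := PySem.Set.add taken_courses course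
    d.keys.foldl (fun acc c =>
      if pvIsEligible c hyp d && !(PySem.Set.contains hyp c) then PySem.Set.add acc c else acc) acc)
    PySem.Set.empty

-- ===== PORT B =====
-- the classification pass: per key (c, prereqs), keep (c, none) if no prerequisite is missing,
-- (c, some m) if exactly one is missing ('(m,) = missing' takes the singleton's element), drop otherwise
def pvClassify (taken_courses : List String) (items : List (String × List String)) : List (String × Option String) :=
  items.foldl (fun cands p =>
    if PySem.Set.contains taken_courses p.1 then cands
    else if (PySem.Set.ofList (p.2.filter (fun q => !(PySem.Set.contains taken_courses q)))).length = 0 then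
      cands ++ [(p.1, none)]
    else if (PySem.Set.ofList (p.2.filter (fun q => !(PySem.Set.contains taken_courses q)))).length = 1 then
      cands ++ [(p.1, some ((PySem.Set.ofList (p.2.filter (fun q => !(PySem.Set.contains taken_courses q)))).headD ""))]
    else cands) []

def find_additional_eligibilities_alt (courses : List String) (taken_courses : List String) (prerequisites : List (String × List String)) : List String :=
  let d := PySem.Dict.ofList prerequisites
  let cands := pvClassify taken_courses d.items
  courses.foldl (fun acc course =>
    cands.foldl (fun acc pc =>
      if pc.1 != course && (match pc.2 with | none => true | some m => m == course) then PySem.Set.add acc pc.1 else acc) acc)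
    PySem.Set.empty

-- ===== PRECONDITION & SPEC =====
def Spec_find_additional_eligibilities (courses : List String) (taken_courses : List String) (prerequisites : List (String × List String)) (out : List String) : Prop := out = find_additional_eligibilities_alt courses taken_courses prerequisites
instance (courses : List String) (taken_courses : List String) (prerequisites : List (String × List String)) (out : List String) : Decidable (Spec_find_additional_eligibilities courses taken_courses prerequisites out) := by unfold Spec_find_additional_eligibilities; infer_instance

-- ===== CLAIM (what is proved, stated in full; the proofs are below) =====
def Claim_equal_find_additional_eligibilities : Prop := ∀ (courses : List String) (taken_courses : List String) (prerequisites : List (String × List String)), Dom_find_additional_eligibilities courses taken_courses prerequisites → Spec_find_additional_eligibilities courses taken_courses prerequisites (find_additional_eligibilities courses taken_courses prerequisites)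

-- ===== LEMMAS AND PROOFS =====

-- one step of pvClassify's loop, as a function producing the (≤ 1) kept entries for a key
def pvG (taken_courses : List String) (p : String × List String) : List (String × Option String) :=
  if PySem.Set.contains taken_courses p.1 then []
  else if (PySem.Set.ofList (p.2.filter (fun q => !(PySem.Set.contains taken_courses q)))).length = 0 then
    [(p.1, none)]
  else if (PySem.Set.ofList (p.2.filter (fun q => !(PySem.Set.contains taken_courses q)))).length = 1 then
    [(p.1, some ((PySem.Set.ofList (p.2.filter (fun q => !(PySem.Set.contains taken_courses q)))).headD ""))]
  else []

lemma pvClassify_eq_flatMap (taken : List String) (items : List (String × List String)) :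
    pvClassify taken items = items.flatMap (pvG taken) := by
  have h : ∀ (l : List (String × List String)) (acc : List (String × Option String)),
      l.foldl (fun cands p =>
        if PySem.Set.contains taken p.1 then cands
        else if (PySem.Set.ofList (p.2.filter (fun q => !(PySem.Set.contains taken q)))).length = 0 then
          cands ++ [(p.1, none)]
        else if (PySem.Set.ofList (p.2.filter (fun q => !(PySem.Set.contains taken q)))).length = 1 then
          cands ++ [(p.1, some ((PySem.Set.ofList (p.2.filter (fun q => !(PySem.Set.contains taken q)))).headD ""))]
        else cands) acc = acc ++ l.flatMap (pvG taken) := by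
    intro l
    induction l with
    | nil => intro acc; simp
    | cons p t ih =>
      intro acc
      rw [List.foldl_cons, ih, List.flatMap_cons, ← List.append_assoc]
      have hstep : (if PySem.Set.contains taken p.1 then acc
          else if (PySem.Set.ofList (p.2.filter (fun q => !(PySem.Set.contains taken q)))).length = 0 then
            acc ++ [(p.1, none)]
          else if (PySem.Set.ofList (p.2.filter (fun q => !(PySem.Set.contains taken q)))).length = 1 then
            acc ++ [(p.1, some ((PySem.Set.ofList (p.2.filter (fun q => !(PySem.Set.contains taken q)))).headD ""))]
          else acc) = acc ++ pvG taken p := by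
        unfold pvG
        split_ifs <;> simp
      rw [hstep]
  exact h items []

lemma pv_contains_add (s : PySem.Set String) (x y : String) :
    PySem.Set.contains (PySem.Set.add s x) y = (PySem.Set.contains s y || y == x) := by
  have hmem := PySem.Set.mem_add s x y
  by_cases h : y ∈ s ∨ y = x
  · rw [(PySem.Set.contains_iff _ _).2 (hmem.2 h)]
    rcases h with h | h
    · rw [(PySem.Set.contains_iff _ _).2 h]; simp
    · subst h; simp
  · obtain ⟨h1, h2⟩ := not_or.1 h
    have c1 : PySem.Set.contains (PySem.Set.add s x) y = false := by
      rw [Bool.eq_false_iff]; intro hc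
      rcases hmem.1 ((PySem.Set.contains_iff _ _).1 hc) with h' | h'
      exacts [h1 h', h2 h']
    have c2 : PySem.Set.contains s y = false := by
      rw [Bool.eq_false_iff]; intro hc; exact h1 ((PySem.Set.contains_iff _ _).1 hc)
    rw [c1, c2]
    simp [h2]

lemma pv_all_or_filter (L : List String) (a b : String → Bool) :
    L.all (fun p => a p || b p) = (L.filter (fun p => !a p)).all b := by
  induction L with
  | nil => rfl
  | cons x t ih =>
    cases hx : a x
    · rw [List.all_cons, List.filter_cons_of_pos (by simp [hx]), List.all_cons, ih, hx, Bool.false_or]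
    · rw [List.all_cons, List.filter_cons_of_neg (by simp [hx]), ih, hx, Bool.true_or, Bool.true_and]

lemma pv_all_ofList (xs : List String) (b : String → Bool) :
    (PySem.Set.ofList xs).all b = xs.all b := by
  cases hx : xs.all b
  · rw [List.all_eq_false] at hx ⊢
    obtain ⟨x, hx1, hx2⟩ := hx
    exact ⟨x, (PySem.Set.mem_ofList xs x).2 hx1, hx2⟩
  · rw [List.all_eq_true] at hx ⊢
    intro x hxm
    exact hx x ((PySem.Set.mem_ofList xs x).1 hxm)

-- one key of A's inner loop = folding B's step over that key's classification entries
lemma pv_elem_eq (d : PySem.Dict String (List String)) (taken : List String) (course : String)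
    (c : String) (v : List String) (hv : d.getD c [] = v) (acc : PySem.Set String) :
    (if pvIsEligible c (PySem.Set.add taken course) d && !(PySem.Set.contains (PySem.Set.add taken course) c)
      then PySem.Set.add acc c else acc)
      = (pvG taken (c, v)).foldl (fun acc pc =>
          if pc.1 != course && (match pc.2 with | none => true | some m => m == course)
          then PySem.Set.add acc pc.1 else acc) acc := by
  have hcadd := pv_contains_add taken course c
  have helig : pvIsEligible c (PySem.Set.add taken course) d
      = (PySem.Set.ofList (v.filter (fun q => !(PySem.Set.contains taken q)))).all (fun q => q == course) := by
    unfold pvIsEligible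
    rw [hv, pv_all_ofList, ← pv_all_or_filter]
    congr 1
    funext p
    exact pv_contains_add taken course p
  by_cases htc : PySem.Set.contains taken c = true
  · -- c already taken: A never adds it, B dropped it in classification
    have hG : pvG taken (c, v) = [] := by unfold pvG; rw [if_pos htc]
    have hc1 : PySem.Set.contains (PySem.Set.add taken course) c = true := by
      rw [hcadd, htc]; rfl
    rw [hG, hc1]
    simp
  · simp only [Bool.not_eq_true] at htc
    have htcmem : c ∉ taken := by
      intro hmem
      have hct := (PySem.Set.contains_iff taken c).2 hmem
      rw [htc] at hct
      exact Bool.false_ne_true hct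
    have hcc : PySem.Set.contains (PySem.Set.add taken course) c = (c == course) := by
      rw [hcadd, htc]; simp
    cases hfl : PySem.Set.ofList (v.filter (fun q => !(PySem.Set.contains taken q))) with
    | nil =>
      -- no missing prerequisite
      have hG : pvG taken (c, v) = [(c, none)] := by
        unfold pvG
        rw [if_neg (by simpa using htcmem)]
        dsimp only
        rw [hfl]
        rfl
      have he : pvIsEligible c (PySem.Set.add taken course) d = true := by rw [helig, hfl]; rfl
      rw [hG, he, hcc, List.foldl_cons, List.foldl_nil]
      simp [bne]
    | cons m rest =>
      cases rest with
      | nil =>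
        -- exactly one missing prerequisite m
        have hG : pvG taken (c, v) = [(c, some m)] := by
          unfold pvG
          rw [if_neg (by simpa using htcmem)]
          dsimp only
          rw [hfl]
          rfl
        have he : pvIsEligible c (PySem.Set.add taken course) d = (m == course) := by
          rw [helig, hfl]; simp
        rw [hG, he, hcc, List.foldl_cons, List.foldl_nil]
        by_cases hm : m = course
        · by_cases hc : c = course
          · simp [hm, hc, bne]
          · simp [hm, hc, bne]
        · simp [hm, bne]
      | cons m2 rest2 =>
        -- at least two missing prerequisites: one extra course can never cover both
        have hnodup : (m :: m2 :: rest2).Nodup := by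
          rw [← hfl]; exact PySem.Set.nodup_ofList _
        have hne : m ≠ m2 := fun h => (List.nodup_cons.1 hnodup).1 (by rw [h]; simp)
        have hG : pvG taken (c, v) = [] := by
          unfold pvG
          rw [if_neg (by simpa using htcmem)]
          dsimp only
          rw [hfl]
          simp
        have he : pvIsEligible c (PySem.Set.add taken course) d = false := by
          rw [helig, hfl]
          rw [List.all_eq_false]
          by_cases h1 : m = course
          · exact ⟨m2, by simp, by simp [h1 ▸ (Ne.symm hne)]⟩
          · exact ⟨m, by simp, by simp [h1]⟩
        rw [hG, he]
        simp
-- A's inner loop over the dict's keys = B's inner loop over the classification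
lemma pv_inner_eq (d : PySem.Dict String (List String)) (taken : List String) (course : String)
    (l : List (String × List String)) (hl : ∀ p ∈ l, d.getD p.1 [] = p.2) (acc : PySem.Set String) :
    (l.map Prod.fst).foldl (fun acc c =>
        if pvIsEligible c (PySem.Set.add taken course) d && !(PySem.Set.contains (PySem.Set.add taken course) c)
        then PySem.Set.add acc c else acc) acc
      = (l.flatMap (pvG taken)).foldl (fun acc pc =>
          if pc.1 != course && (match pc.2 with | none => true | some m => m == course)
          then PySem.Set.add acc pc.1 else acc) acc := by
  induction l generalizing acc with
  | nil => rfl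
  | cons p t ih =>
    rw [List.map_cons, List.foldl_cons, List.flatMap_cons, List.foldl_append]
    rw [← ih (fun q hq => hl q (List.mem_cons_of_mem p hq))]
    rw [pv_elem_eq d taken course p.1 p.2 (hl p List.mem_cons_self)]

-- ===== VERDICT (by name: the statement is the Claim_ definition above) =====
theorem find_additional_eligibilities_spec : Claim_equal_find_additional_eligibilities := by
  intro courses taken prereqs _
  unfold Spec_find_additional_eligibilities find_additional_eligibilities find_additional_eligibilities_alt
  dsimp only
  rw [pvClassify_eq_flatMap]
  have hnd : (PySem.Dict.ofList prereqs).keys.Nodup := PySem.Dict.nodup_keys_ofList prereqs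
  have hl : ∀ p ∈ (PySem.Dict.ofList prereqs).items, (PySem.Dict.ofList prereqs).getD p.1 [] = p.2 := by
    intro p hp
    obtain ⟨k, v⟩ := p
    exact PySem.Dict.getD_of_mem_items _ hp hnd []
  have hkeys : (PySem.Dict.ofList prereqs).keys = (PySem.Dict.ofList prereqs).items.map Prod.fst := rfl
  rw [hkeys]
  congr 1
  funext acc course
  exact pv_inner_eq (PySem.Dict.ofList prereqs) taken course (PySem.Dict.ofList prereqs).items hl acc
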